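-- pv_equiv track=rewrite | github.com/pypi-data/pypi-mirror-42 | packages/dichotomy/dichotomy-0.1.1.tar.gz/dichotomy-0.1.1/dichotomy/generators.py | nlr_gen
-- ===== SOURCE A (Python) =====
-- def nlr_gen(left, right, parent):
--     """
--     left и right являются zero-based индексами.
--     https://en.wikipedia.org/wiki/Tree_traversal#Pre-order_(NLR)
--     """
--
--     # Количество элементов от left до right включительно:
--     cnt_from_left_to_right_inclusive = right - left + 1
--
--     # Если элементов всего два:
--     if cnt_from_left_to_right_inclusive == 2:
--         # Например:
--         #  4 5 выдаст 4 и 5.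
--         yield (left, parent)
--         yield (right, left)
--         return
--
--     # Определение центрального элемента:
--     center_idx = left + cnt_from_left_to_right_inclusive // 2
--
--     # Пример определения центрального элемента для НЕЧЕТНОГО количества элементов:
--     # 0 1 2 3 4 >5< 6 7 8 9 10
--     # 0 + (10 - 0 + 1) div 2 = 11 div 2 = 5
--
--     # Пример определения центрального элемента для ЧЕТНОГО количества элементов:
--     # 0 1 2 3 >4< 5 6 7
--     # 0 + (7 - 0 + 1) div 2 = 8 div 2 = 4
--
--     # Пример определения центрального элемента для НЕЧЕТНОГО количества элементов:
--     # 5 >6< 7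
--     # 5 + (7 - 5 + 1) div 2 = 5 + 3 div 2 = 5 + 1 = 6
--
--     # Пример определения центрального элемента для ЧЕТНОГО количества элементов:
--     # 4 5 >6< 7
--     # 4 + (7 - 4 + 1) div 2 = 4 + 4 div 2 = 4 + 2 = 6
--
--     # Если количество элементов чётное:
--     if cnt_from_left_to_right_inclusive % 2 == 0:
--         center_idx -= 1
--
--     yield (center_idx, parent)
--
--     # Левая часть:
--     if center_idx - 1 == left:
--         # Например:
--         #  4 >5< 6 7 выдаст 4.
--         yield (left, center_idx)
--     elif center_idx - 1 > left:
--         # Например: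
--         #  0 1 2 3 4 >5< 6 7 8 9 10 выдаст bin_div_gen(0, 4).
--         yield from nlr_gen(left, center_idx - 1, center_idx)
--
--     # Правая часть:
--     if center_idx + 1 == right:
--         # Например:
--         #  4 5 >6< 7 выдаст 7.
--         yield (right, center_idx)
--     elif center_idx + 1 < right:
--         # Например:
--         #  0 1 2 3 4 >5< 6 7 8 9 10 выдаст bin_div_gen(6, 10).
--         yield from nlr_gen(center_idx + 1, right, center_idx)
-- ===== SOURCE B (Python) =====
-- def nlr_gen(left, right, parent):
--     """Iterative version: explicit stack of ('expand'/'yield') items instead of recursion."""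
--     out = []
--     stack = [('expand', left, right, parent)]
--     while stack:
--         tag, *rest = stack.pop()
--         if tag == 'yield':
--             i, p = rest
--             out.append((i, p))
--             continue
--         l, r, p = rest
--         cnt = r - l + 1
--         if cnt == 2:
--             out.append((l, p))
--             out.append((r, l))
--             continue
--         c = l + cnt // 2
--         if cnt % 2 == 0:
--             c -= 1
--         out.append((c, p))
--         # push right branch first, left branch last, so the left side is emitted first
--         if c + 1 == r:
--             stack.append(('yield', r, c))
--         elif c + 1 < r:
--             stack.append(('expand', c + 1, r, c))
--         if c - 1 == l:
--             stack.append(('yield', l, c))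
--         elif c - 1 > l:
--             stack.append(('expand', l, c - 1, c))
--     return out
-- ===== Notes on version B (the rewrite author's own statement) =====
-- stated objective: alternative
-- what changed: Replaced A's recursive generator by an iterative while-loop over an explicit stack of ('expand', l, r, p) range frames and ('yield', i, p) leaf items, pushing the right branch before the left so the pre-order emission order is preserved.
import Mathlib
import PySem

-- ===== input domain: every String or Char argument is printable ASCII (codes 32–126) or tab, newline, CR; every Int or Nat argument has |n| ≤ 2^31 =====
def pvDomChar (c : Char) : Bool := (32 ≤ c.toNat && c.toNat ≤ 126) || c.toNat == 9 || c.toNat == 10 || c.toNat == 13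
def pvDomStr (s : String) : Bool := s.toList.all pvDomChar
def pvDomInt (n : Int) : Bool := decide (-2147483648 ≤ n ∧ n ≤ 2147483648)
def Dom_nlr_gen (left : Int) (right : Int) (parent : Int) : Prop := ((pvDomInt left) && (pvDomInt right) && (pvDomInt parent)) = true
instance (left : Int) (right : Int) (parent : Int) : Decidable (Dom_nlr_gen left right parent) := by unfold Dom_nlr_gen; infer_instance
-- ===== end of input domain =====

-- B replaces A's recursive generator by an iterative while-loop over an explicit stack (alternative decomposition, same cost).

-- ===== PORT A =====
-- A's center computation: center = left + cnt // 2, minus 1 when cnt is even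
def nlrCenterA (l : Int) (r : Int) : Int :=
  if PySem.Int.mod (r - l + 1) 2 = 0 then l + PySem.Int.floordiv (r - l + 1) 2 - 1
  else l + PySem.Int.floordiv (r - l + 1) 2

-- literal transliteration of A's recursive generator (yields collected into a list, in
-- yield order); the Nat fuel is only a structural-termination guard: the first argument
-- below is always enough fuel, so the 0-fuel branch is never reached
def nlrGenGo : Nat → Int → Int → Int → List (Int × Int)
  | 0, _, _, _ => []
  | fuel + 1, left, right, parent =>
    if right - left + 1 = 2 then
      [(left, parent), (right, left)]
    else
      (nlrCenterA left right, parent) ::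
        ((if nlrCenterA left right - 1 = left then [(left, nlrCenterA left right)]
          else if nlrCenterA left right - 1 > left then
            nlrGenGo fuel left (nlrCenterA left right - 1) (nlrCenterA left right)
          else []) ++
         (if nlrCenterA left right + 1 = right then [(right, nlrCenterA left right)]
          else if nlrCenterA left right + 1 < right then
            nlrGenGo fuel (nlrCenterA left right + 1) right (nlrCenterA left right)
          else []))

def nlr_gen (left : Int) (right : Int) (parent : Int) : List (Int × Int) :=
  nlrGenGo ((right - left + 1).toNat + 1) left right parent

-- ===== PORT B =====
-- stack items of Source B: ('expand', l, r, p) frames and ('yield', i, p) leaves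
inductive NlrItem : Type
  | expand : Int → Int → Int → NlrItem
  | yld : Int → Int → NlrItem
deriving DecidableEq, Repr

def nlrItemMeasure : NlrItem → Nat
  | .yld _ _ => 1
  | .expand l r _ => 2 * (r - l + 1).toNat + 1

def nlrStackMeasure (stack : List NlrItem) : Nat :=
  (stack.map nlrItemMeasure).sum

def nlrCenterB (l : Int) (r : Int) : Int :=
  if PySem.Int.mod (r - l + 1) 2 = 0 then l + PySem.Int.floordiv (r - l + 1) 2 - 1
  else l + PySem.Int.floordiv (r - l + 1) 2

-- the while-loop of Source B: top of the stack is the list head (Python pops from the end);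
-- Source B pushes the right branch first, then the left branch, so the left branch is on top.
-- The Nat fuel is only a structural-termination guard (the loop runs at most
-- nlrStackMeasure iterations, which is what nlr_gen_alt passes), never the exit condition:
-- the loop exits when the stack is empty, as in Source B
def nlrLoopGo : Nat → List NlrItem → List (Int × Int) → List (Int × Int)
  | _, [], out => out
  | 0, _ :: _, out => out
  | fuel + 1, .yld i p :: rest, out => nlrLoopGo fuel rest (out ++ [(i, p)])
  | fuel + 1, .expand l r p :: rest, out =>
    if r - l + 1 = 2 then
      nlrLoopGo fuel rest (out ++ [(l, p), (r, l)])
    else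
      nlrLoopGo fuel
        ((if nlrCenterB l r - 1 = l then [NlrItem.yld l (nlrCenterB l r)]
          else if nlrCenterB l r - 1 > l then [NlrItem.expand l (nlrCenterB l r - 1) (nlrCenterB l r)]
          else []) ++
         (if nlrCenterB l r + 1 = r then [NlrItem.yld r (nlrCenterB l r)]
          else if nlrCenterB l r + 1 < r then [NlrItem.expand (nlrCenterB l r + 1) r (nlrCenterB l r)]
          else []) ++ rest)
        (out ++ [(nlrCenterB l r, p)])

def nlr_gen_alt (left : Int) (right : Int) (parent : Int) : List (Int × Int) :=
  nlrLoopGo (nlrStackMeasure [.expand left right parent]) [.expand left right parent] []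

-- ===== PRECONDITION & SPEC =====
def Spec_nlr_gen (left : Int) (right : Int) (parent : Int) (out : List (Int × Int)) : Prop := out = nlr_gen_alt left right parent
instance (left : Int) (right : Int) (parent : Int) (out : List (Int × Int)) : Decidable (Spec_nlr_gen left right parent out) := by unfold Spec_nlr_gen; infer_instance

-- ===== CLAIM (what is proved, stated in full; the proofs are below) =====
def Claim_equal_nlr_gen : Prop := ∀ (left : Int) (right : Int) (parent : Int), Dom_nlr_gen left right parent → Spec_nlr_gen left right parent (nlr_gen left right parent)

-- ===== LEMMAS AND PROOFS =====

theorem nlrCenterA_eq (l r : Int) :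
    nlrCenterA l r =
      if (r - l + 1) % 2 = 0 then l + (r - l + 1) / 2 - 1 else l + (r - l + 1) / 2 := by
  unfold nlrCenterA
  rw [PySem.Int.mod_eq_emod_of_pos (by norm_num), PySem.Int.floordiv_eq_ediv_of_pos (by norm_num)]

theorem nlrCenterB_eq (l r : Int) :
    nlrCenterB l r =
      if (r - l + 1) % 2 = 0 then l + (r - l + 1) / 2 - 1 else l + (r - l + 1) / 2 := by
  unfold nlrCenterB
  rw [PySem.Int.mod_eq_emod_of_pos (by norm_num), PySem.Int.floordiv_eq_ediv_of_pos (by norm_num)]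

theorem nlrCenter_AB (l r : Int) : nlrCenterA l r = nlrCenterB l r := rfl

-- small toNat bridges
theorem pvToNat_lt (a b : Int) (h0 : 0 < b) (hab : a < b) : a.toNat < b.toNat :=
  (Int.toNat_lt_toNat h0).mpr hab

theorem pvToNat_split (x y z : Int) (hx : 0 ≤ x) (hy : 0 ≤ y) (hz : z = x + y + 1) :
    z.toNat = x.toNat + y.toNat + 1 := by
  subst hz
  rw [Int.toNat_add (by omega) (by omega : (0:Int) ≤ 1), Int.toNat_add hx hy, Int.toNat_one]

theorem pvToNat_shift (x y : Int) (k : Nat) (hx : 0 ≤ x) (hxy : y = x + (k : Int)) :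
    y.toNat = x.toNat + k := by
  subst hxy
  rw [Int.toNat_add hx (Int.natCast_nonneg k), Int.toNat_natCast]

theorem nlrCenterA_min_max (l r : Int) :
    min l r ≤ nlrCenterA l r ∧ nlrCenterA l r ≤ max l r := by
  have hq := Int.emod_add_mul_ediv (r - l + 1) 2
  have hm := Int.emod_two_eq_zero_or_one (r - l + 1)
  rw [nlrCenterA_eq]
  generalize hqq : (r - l + 1) / 2 = q at *
  generalize hmm : (r - l + 1) % 2 = m at *
  clear hqq hmm
  rcases hm with h | h <;> subst h <;> simp only [reduceIte, one_ne_zero, if_false] <;>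
    constructor <;> omega

theorem nlrA_dec_left (l r : Int) (h : nlrCenterA l r - 1 > l) :
    (nlrCenterA l r - 1 - l + 1).toNat < (r - l + 1).toNat := by
  obtain ⟨h1, h2⟩ := nlrCenterA_min_max l r
  exact pvToNat_lt _ _ (by omega) (by omega)

theorem nlrA_dec_right (l r : Int) (h : nlrCenterA l r + 1 < r) :
    (r - (nlrCenterA l r + 1) + 1).toNat < (r - l + 1).toNat := by
  obtain ⟨h1, h2⟩ := nlrCenterA_min_max l r
  exact pvToNat_lt _ _ (by omega) (by omega)

-- enough fuel means the fuel guard never fires: any two sufficient fuels agree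
theorem nlrGenGo_congr (f : Nat) : ∀ (g : Nat) (l r p : Int),
    (r - l + 1).toNat < f → (r - l + 1).toNat < g →
    nlrGenGo f l r p = nlrGenGo g l r p := by
  induction f with
  | zero => intro g l r p hf; omega
  | succ f ih =>
    intro g l r p hf hg
    obtain ⟨g', rfl⟩ : ∃ g', g = g' + 1 := ⟨g - 1, by omega⟩
    rw [nlrGenGo, nlrGenGo]
    by_cases hc : r - l + 1 = 2
    · rw [if_pos hc, if_pos hc]
    · rw [if_neg hc, if_neg hc]
      refine congrArg _ (congrArg₂ _ ?_ ?_)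
      · by_cases hl1 : nlrCenterA l r - 1 = l
        · rw [if_pos hl1, if_pos hl1]
        · rw [if_neg hl1, if_neg hl1]
          by_cases hl2 : nlrCenterA l r - 1 > l
          · rw [if_pos hl2, if_pos hl2]
            exact ih g' l (nlrCenterA l r - 1) (nlrCenterA l r)
              (by have := nlrA_dec_left l r hl2; omega)
              (by have := nlrA_dec_left l r hl2; omega)
          · rw [if_neg hl2, if_neg hl2]
      · by_cases hr1 : nlrCenterA l r + 1 = r
        · rw [if_pos hr1, if_pos hr1]
        · rw [if_neg hr1, if_neg hr1]
          by_cases hr2 : nlrCenterA l r + 1 < r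
          · rw [if_pos hr2, if_pos hr2]
            exact ih g' (nlrCenterA l r + 1) r (nlrCenterA l r)
              (by have := nlrA_dec_right l r hr2; omega)
              (by have := nlrA_dec_right l r hr2; omega)
          · rw [if_neg hr2, if_neg hr2]

-- nlr_gen unfolds one recursion step of A
theorem nlr_gen_unfold (l r p : Int) :
    nlr_gen l r p =
      if r - l + 1 = 2 then [(l, p), (r, l)]
      else
        (nlrCenterA l r, p) ::
          ((if nlrCenterA l r - 1 = l then [(l, nlrCenterA l r)]
            else if nlrCenterA l r - 1 > l then nlr_gen l (nlrCenterA l r - 1) (nlrCenterA l r)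
            else []) ++
           (if nlrCenterA l r + 1 = r then [(r, nlrCenterA l r)]
            else if nlrCenterA l r + 1 < r then nlr_gen (nlrCenterA l r + 1) r (nlrCenterA l r)
            else [])) := by
  unfold nlr_gen
  rw [nlrGenGo]
  by_cases hc : r - l + 1 = 2
  · rw [if_pos hc, if_pos hc]
  · rw [if_neg hc, if_neg hc]
    refine congrArg _ (congrArg₂ _ ?_ ?_)
    · by_cases hl1 : nlrCenterA l r - 1 = l
      · rw [if_pos hl1, if_pos hl1]
      · rw [if_neg hl1, if_neg hl1]
        by_cases hl2 : nlrCenterA l r - 1 > l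
        · rw [if_pos hl2, if_pos hl2]
          exact nlrGenGo_congr _ _ l (nlrCenterA l r - 1) (nlrCenterA l r)
            (by have := nlrA_dec_left l r hl2; omega) (by omega)
        · rw [if_neg hl2, if_neg hl2]
    · by_cases hr1 : nlrCenterA l r + 1 = r
      · rw [if_pos hr1, if_pos hr1]
      · rw [if_neg hr1, if_neg hr1]
        by_cases hr2 : nlrCenterA l r + 1 < r
        · rw [if_pos hr2, if_pos hr2]
          exact nlrGenGo_congr _ _ (nlrCenterA l r + 1) r (nlrCenterA l r)
            (by have := nlrA_dec_right l r hr2; omega) (by omega)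
        · rw [if_neg hr2, if_neg hr2]

-- measure facts for the stack loop
theorem nlrCenterB_min_max (l r : Int) :
    min l r ≤ nlrCenterB l r ∧ nlrCenterB l r ≤ max l r := by
  have hq := Int.emod_add_mul_ediv (r - l + 1) 2
  have hm := Int.emod_two_eq_zero_or_one (r - l + 1)
  rw [nlrCenterB_eq]
  generalize hqq : (r - l + 1) / 2 = q at *
  generalize hmm : (r - l + 1) % 2 = m at *
  clear hqq hmm
  rcases hm with h | h <;> subst h <;> simp only [reduceIte, one_ne_zero, if_false] <;>
    constructor <;> omega

theorem nlrB_dec_expand (l r : Int) (rest : List NlrItem) :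
    nlrStackMeasure
      ((if nlrCenterB l r - 1 = l then [NlrItem.yld l (nlrCenterB l r)]
        else if nlrCenterB l r - 1 > l then [NlrItem.expand l (nlrCenterB l r - 1) (nlrCenterB l r)]
        else []) ++
       (if nlrCenterB l r + 1 = r then [NlrItem.yld r (nlrCenterB l r)]
        else if nlrCenterB l r + 1 < r then [NlrItem.expand (nlrCenterB l r + 1) r (nlrCenterB l r)]
        else []) ++ rest) < 2 * (r - l + 1).toNat + 1 + nlrStackMeasure rest := by
  obtain ⟨h1, h2⟩ := nlrCenterB_min_max l r
  simp only [nlrStackMeasure, List.map_append, List.sum_append]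
  split_ifs <;>
    simp only [List.map_cons, List.map_nil, List.sum_cons, List.sum_nil, nlrItemMeasure,
      Nat.zero_add, Nat.add_zero]
  · rw [pvToNat_shift 0 (r - l + 1) 3 le_rfl (by omega), Int.toNat_zero]
    omega
  · rw [pvToNat_shift (r - (nlrCenterB l r + 1) + 1) (r - l + 1) 2 (by omega) (by omega)]
    generalize (r - (nlrCenterB l r + 1) + 1).toNat = n
    omega
  · rw [pvToNat_shift (r - l) (r - l + 1) 1 (by omega) (by omega)]
    generalize (r - l).toNat = n
    omega
  · rw [pvToNat_shift (nlrCenterB l r - 1 - l + 1) (r - l + 1) 2 (by omega) (by omega)]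
    generalize (nlrCenterB l r - 1 - l + 1).toNat = n
    omega
  · rw [pvToNat_split (nlrCenterB l r - 1 - l + 1) (r - (nlrCenterB l r + 1) + 1) (r - l + 1)
        (by omega) (by omega) (by omega)]
    generalize (nlrCenterB l r - 1 - l + 1).toNat = n
    generalize (r - (nlrCenterB l r + 1) + 1).toNat = m
    omega
  · rw [pvToNat_shift (nlrCenterB l r - 1 - l + 1) (r - l + 1) 1 (by omega) (by omega)]
    generalize (nlrCenterB l r - 1 - l + 1).toNat = n
    omega
  · rw [pvToNat_shift (r - l) (r - l + 1) 1 (by omega) (by omega)]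
    generalize (r - l).toNat = n
    omega
  · rw [pvToNat_shift (r - (nlrCenterB l r + 1) + 1) (r - l + 1) 1 (by omega) (by omega)]
    generalize (r - (nlrCenterB l r + 1) + 1).toNat = n
    omega
  · generalize (r - l + 1).toNat = n
    omega

-- what each stack item contributes to the output
def nlrEmit : NlrItem → List (Int × Int)
  | .yld i p => [(i, p)]
  | .expand l r p => nlr_gen l r p

theorem nlrLoopGo_flatMap (f : Nat) : ∀ (stack : List NlrItem) (out : List (Int × Int)),
    nlrStackMeasure stack ≤ f → nlrLoopGo f stack out = out ++ stack.flatMap nlrEmit := by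
  induction f with
  | zero =>
    intro stack out h
    cases stack with
    | nil => simp [nlrLoopGo]
    | cons it rest =>
      exfalso
      cases it <;> simp [nlrStackMeasure, nlrItemMeasure] at h
  | succ f ih =>
    intro stack out h
    cases stack with
    | nil => simp [nlrLoopGo]
    | cons it rest =>
      cases it with
      | yld i p =>
        rw [nlrLoopGo, ih rest (out ++ [(i, p)])
          (by simp only [nlrStackMeasure, List.map_cons, List.sum_cons, nlrItemMeasure] at h ⊢; omega)]
        simp [nlrEmit]
      | expand l r p =>
        have hm : nlrStackMeasure (NlrItem.expand l r p :: rest) =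
            2 * (r - l + 1).toNat + 1 + nlrStackMeasure rest := by
          simp [nlrStackMeasure, nlrItemMeasure]
        rw [nlrLoopGo]
        by_cases hc : r - l + 1 = 2
        · rw [if_pos hc, ih rest (out ++ [(l, p), (r, l)]) (by omega)]
          have hA : nlr_gen l r p = [(l, p), (r, l)] := by
            rw [nlr_gen_unfold, if_pos hc]
          simp [nlrEmit, hA]
        · rw [if_neg hc, ih _ (out ++ [(nlrCenterB l r, p)])
            (by have := nlrB_dec_expand l r rest; omega)]
          simp only [List.flatMap_append, List.flatMap_cons, nlrEmit]
          rw [nlr_gen_unfold, if_neg hc]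
          simp only [nlrCenter_AB]
          split_ifs <;> simp [nlrEmit]

-- ===== VERDICT (by name: the statement is the Claim_ definition above) =====
theorem nlr_gen_spec : Claim_equal_nlr_gen := by
  intro left right parent _
  unfold Spec_nlr_gen nlr_gen_alt
  rw [nlrLoopGo_flatMap _ _ _ (le_refl _)]
  simp [nlrEmit]
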